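-- pv_equiv track=rewrite | github.com/oscarparedez/compiler-project-1 | read_yal.py | detect_substring
-- ===== SOURCE A (Python) =====
-- def detect_substring(dictionary, s):
--     substrings = []
--     for i in range(len(s)):
--         for j in range(i+1, len(s)+1):
--             substring = s[i:j]
--             for dict_key in dictionary.keys():
--                 if substring == dict_key and substring not in substrings:
--                     substrings.append(substring)
--     return sorted(substrings, key=len, reverse=True)
-- ===== SOURCE B (Python) =====
-- def detect_substring(dictionary, s):
--     matches = [k for k in dictionary if k and k in s]
--     return sorted(matches, key=lambda k: (-len(k), s.find(k)))
-- ===== Notes on version B (the rewrite author's own statement) =====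
-- stated objective: faster
-- what changed: Instead of enumerating all O(n^2) substrings of s and scanning the key list for each (then stably sorting by length descending), B scans the dictionary keys once, keeps the nonempty keys that occur in s, and sorts them by (-len(k), s.find(k)), which reproduces A's length-descending order with ties broken by first occurrence position.
import Mathlib
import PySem

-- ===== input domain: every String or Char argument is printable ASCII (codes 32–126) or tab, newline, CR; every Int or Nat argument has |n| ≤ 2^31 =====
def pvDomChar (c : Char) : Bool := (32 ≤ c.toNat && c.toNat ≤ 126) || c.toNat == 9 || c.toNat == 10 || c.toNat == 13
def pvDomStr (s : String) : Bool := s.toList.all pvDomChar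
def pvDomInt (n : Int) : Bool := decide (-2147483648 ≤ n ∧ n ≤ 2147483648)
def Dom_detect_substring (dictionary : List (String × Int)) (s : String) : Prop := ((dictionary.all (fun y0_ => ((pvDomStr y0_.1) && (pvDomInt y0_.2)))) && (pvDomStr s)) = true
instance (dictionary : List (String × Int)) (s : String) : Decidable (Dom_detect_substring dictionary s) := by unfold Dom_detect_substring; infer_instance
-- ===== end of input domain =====

-- B replaces A's enumeration of all substrings by a single scan over the dictionary keys
-- (keep the nonempty keys occurring in s, sort by (-length, first occurrence)); objective: faster.

-- ===== PORT A =====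
def detect_substring (dictionary : List (String × Int)) (s : String) : List String :=
  let substrings : List String :=
    (PySem.List.pyRange 0 (PySem.Str.len s)).foldl
      (fun substrings i =>
        (PySem.List.pyRange (i + 1) (PySem.Str.len s + 1)).foldl
          (fun substrings j =>
            let substring := PySem.Str.slice s (some i) (some j)
            ((PySem.Dict.ofList dictionary).keys).foldl
              (fun substrings dict_key =>
                if substring = dict_key ∧ substring ∉ substrings then substrings ++ [substring]
                else substrings)
              substrings)
          substrings)
      []
  PySem.List.sorted substrings PySem.Str.len true

-- ===== PORT B =====
def detect_substring_alt (dictionary : List (String × Int)) (s : String) : List String :=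
  let matched : List String :=
    ((PySem.Dict.ofList dictionary).keys).filter (fun k => decide (k ≠ "") && PySem.Str.isIn k s)
  PySem.List.sorted2 matched (fun k => -(PySem.Str.len k)) (fun k => PySem.Str.find s k) false

-- ===== PRECONDITION & SPEC =====
def Spec_detect_substring (dictionary : List (String × Int)) (s : String) (out : List String) : Prop := out = detect_substring_alt dictionary s
instance (dictionary : List (String × Int)) (s : String) (out : List String) : Decidable (Spec_detect_substring dictionary s out) := by unfold Spec_detect_substring; infer_instance

-- ===== CLAIM (what is proved, stated in full; the proofs are below) =====
def Claim_equal_detect_substring : Prop := ∀ (dictionary : List (String × Int)) (s : String), Dom_detect_substring dictionary s → Spec_detect_substring dictionary s (detect_substring dictionary s)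

-- ===== LEMMAS AND PROOFS =====

-- the substring of c at pair p = (i, j), i.e. s[i:j]
def pvSubstr (c : List Char) (p : ℕ × ℕ) : String :=
  String.ofList (List.take (p.2 - p.1) (List.drop p.1 c))

-- one step of A's collection loop (after collapsing the innermost scan over the keys)
def pvStep (K : List String) (c : List Char) (S : List String) (p : ℕ × ℕ) : List String :=
  if pvSubstr c p ∈ K ∧ pvSubstr c p ∉ S then S ++ [pvSubstr c p] else S

-- all index pairs (i, j) with i < j ≤ n, in A's loop order (lexicographic)
def pvPairs (n : ℕ) : List (ℕ × ℕ) :=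
  (List.range n).flatMap (fun i => (List.range' (i + 1) (n - i)).map (fun j => (i, j)))

def pvPlex (p q : ℕ × ℕ) : Prop := p.1 < q.1 ∨ (p.1 = q.1 ∧ p.2 < q.2)

-- first occurrence index of x in c, and the pair at which A first appends x
def pvF (c : List Char) (x : String) : ℕ := (PySem.Chars.find c x.toList).toNat
def pvFp (c : List Char) (x : String) : ℕ × ℕ := (pvF c x, pvF c x + x.toList.length)

-- x is a nonempty substring of c that is a key of the dictionary
def pvMatched (K : List String) (c : List Char) (x : String) : Prop :=
  x ∈ K ∧ x.toList ≠ [] ∧ x.toList <:+: c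

-- the (non-strict) lexicographic order on the sort key of B
def pvRle (k1 k2 : String → ℤ) (a b : String) : Prop :=
  k1 a < k1 b ∨ (k1 a = k1 b ∧ k2 a ≤ k2 b)

lemma pvKeysFold_of_mem (K : List String) (x : String) (S : List String) (hx : x ∈ S) :
    K.foldl (fun S k => if x = k ∧ x ∉ S then S ++ [x] else S) S = S := by
  induction K generalizing S with
  | nil => rfl
  | cons k K ih =>
    simp only [List.foldl_cons]
    rw [if_neg (by tauto), ih S hx]

lemma pvKeysFold (K : List String) (x : String) (S : List String) :
    K.foldl (fun S k => if x = k ∧ x ∉ S then S ++ [x] else S) S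
      = if x ∈ K ∧ x ∉ S then S ++ [x] else S := by
  induction K generalizing S with
  | nil => simp
  | cons k K ih =>
    simp only [List.foldl_cons]
    by_cases hk : x = k ∧ x ∉ S
    · rw [if_pos hk, pvKeysFold_of_mem K x (S ++ [x]) (by simp)]
      rw [if_pos ⟨by simp [hk.1], hk.2⟩]
    · rw [if_neg hk, ih S]
      by_cases hxS : x ∈ S
      · simp [hxS]
      · have hxk : x ≠ k := fun h => hk ⟨h, hxS⟩
        simp [hxS, hxk]

lemma pvPyRange_natCast (a b : ℕ) :
    PySem.List.pyRange (a : ℤ) (b : ℤ) = (List.range' a (b - a)).map (Nat.cast : ℕ → ℤ) := by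
  by_cases h : a < b
  · obtain ⟨d, rfl⟩ : ∃ d, b = a + d := ⟨b - a, by omega⟩
    induction d with
    | zero => omega
    | succ d ih =>
      have hc : ((a + (d + 1) : ℕ) : ℤ) = ((a + d : ℕ) : ℤ) + 1 := by push_cast; ring
      rw [hc, PySem.List.pyRange_one_succ_right (by push_cast; omega)]
      by_cases hd : 0 < d
      · rw [ih (by omega)]
        rw [show a + (d + 1) - a = d + 1 by omega, show a + d - a = d by omega,
          List.range'_concat]
        simp
      · have hd0 : d = 0 := by omega
        subst hd0
        have : PySem.List.pyRange (a : ℤ) ((a + 0 : ℕ) : ℤ) = [] := by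
          rw [List.eq_nil_iff_forall_not_mem]
          intro x hx
          rw [PySem.List.mem_pyRange_one] at hx
          omega
        rw [this]
        simp
  · have : PySem.List.pyRange (a : ℤ) (b : ℤ) = [] := by
      rw [List.eq_nil_iff_forall_not_mem]
      intro x hx
      rw [PySem.List.mem_pyRange_one] at hx
      omega
    rw [this, show b - a = 0 by omega]
    simp

lemma pvMem_pvPairs (n : ℕ) (p : ℕ × ℕ) : p ∈ pvPairs n ↔ p.1 < p.2 ∧ p.2 ≤ n := by
  obtain ⟨i, j⟩ := p
  simp only [pvPairs, List.mem_flatMap, List.mem_map, List.mem_range, List.mem_range'_1]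
  constructor
  · rintro ⟨a, ha, b, hb, h⟩
    obtain ⟨rfl, rfl⟩ : a = i ∧ b = j := by
      constructor <;> [exact congrArg Prod.fst h; exact congrArg Prod.snd h]
    omega
  · rintro ⟨h1, h2⟩
    exact ⟨i, by omega, j, by omega, rfl⟩

lemma pvFlatMap_pairwise {α β : Type} (R : β → β → Prop) (l : List α) (f : α → List β)
    (hin : ∀ a ∈ l, (f a).Pairwise R)
    (hcross : l.Pairwise (fun a b => ∀ p ∈ f a, ∀ q ∈ f b, R p q)) :
    (l.flatMap f).Pairwise R := by
  induction l with
  | nil => simp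
  | cons a l ih =>
    rw [List.flatMap_cons, List.pairwise_append]
    rw [List.pairwise_cons] at hcross
    refine ⟨hin a (by simp), ih (fun b hb => hin b (by simp [hb])) hcross.2, ?_⟩
    intro p hp q hq
    rw [List.mem_flatMap] at hq
    obtain ⟨b, hb, hqb⟩ := hq
    exact hcross.1 b hb p hp q hqb

lemma pvPairs_sorted (n : ℕ) : (pvPairs n).Pairwise pvPlex := by
  apply pvFlatMap_pairwise
  · intro i _
    rw [List.pairwise_map]
    exact (List.pairwise_lt_range' 1).imp (fun h => Or.inr ⟨rfl, h⟩)
  · apply (List.pairwise_lt_range).imp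
    intro a b hab p hp q hq
    simp only [List.mem_map] at hp hq
    obtain ⟨x, _, rfl⟩ := hp
    obtain ⟨y, _, rfl⟩ := hq
    exact Or.inl hab

lemma pvF_cast {K : List String} {c : List Char} {x : String} (h : pvMatched K c x) :
    ((pvF c x : ℕ) : ℤ) = PySem.Chars.find c x.toList := by
  have := (PySem.Chars.find_nonneg_iff c x.toList).mpr h.2.2
  simp [pvF, Int.toNat_of_nonneg this]

lemma pvPrefix {K : List String} {c : List Char} {x : String} (h : pvMatched K c x) :
    x.toList <+: List.drop (pvF c x) c :=
  (PySem.Chars.find_spec ((PySem.Chars.find_nonneg_iff c x.toList).mpr h.2.2)).1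

lemma pvTake {K : List String} {c : List Char} {x : String} (h : pvMatched K c x) :
    x.toList = List.take x.toList.length (List.drop (pvF c x) c) :=
  List.prefix_iff_eq_take.mp (pvPrefix h)

lemma pvFp_valid {K : List String} {c : List Char} {x : String} (h : pvMatched K c x) :
    (pvFp c x).1 < (pvFp c x).2 ∧ (pvFp c x).2 ≤ c.length := by
  have hp := pvPrefix h
  have hlen := hp.length_le
  rw [List.length_drop] at hlen
  have hne : 0 < x.toList.length := List.length_pos_of_ne_nil h.2.1
  have hfl : pvF c x ≤ c.length := by
    have := PySem.Chars.find_le_length c x.toList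
    simp [pvF]
    omega
  constructor
  · show pvF c x < pvF c x + x.toList.length
    omega
  · show pvF c x + x.toList.length ≤ c.length
    omega

lemma pvUnique {K : List String} {c : List Char} {x : String} {p : ℕ × ℕ}
    (h : pvMatched K c x) (hfp : pvFp c x = p) : x = pvSubstr c p := by
  subst hfp
  rw [← String.toList_inj]
  rw [pvSubstr, String.toList_ofList]
  have h2 : (pvFp c x).2 - (pvFp c x).1 = x.toList.length := by simp [pvFp]
  rw [h2]
  show x.toList = List.take x.toList.length (List.drop (pvF c x) c)
  exact pvTake h

lemma pvSubstr_toList {c : List Char} {p : ℕ × ℕ} :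
    (pvSubstr c p).toList = List.take (p.2 - p.1) (List.drop p.1 c) := by
  simp [pvSubstr]

lemma pvSubstr_len {c : List Char} {p : ℕ × ℕ} (_h1 : p.1 < p.2) (h2 : p.2 ≤ c.length) :
    (pvSubstr c p).toList.length = p.2 - p.1 := by
  rw [pvSubstr_toList]
  simp
  omega

lemma pvSubstr_matched {c : List Char} {p : ℕ × ℕ} (h1 : p.1 < p.2) (h2 : p.2 ≤ c.length) :
    (pvSubstr c p).toList ≠ [] ∧ (pvSubstr c p).toList <:+: c := by
  constructor
  · intro h
    have := pvSubstr_len h1 h2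
    rw [h] at this
    simp at this
    omega
  · rw [pvSubstr_toList]
    exact ((List.take_prefix _ _).isInfix).trans ((List.drop_suffix _ _).isInfix)

lemma pvF_le {c : List Char} {K : List String} {p : ℕ × ℕ} (h1 : p.1 < p.2) (h2 : p.2 ≤ c.length)
    (hm : pvMatched K c (pvSubstr c p)) :
    pvF c (pvSubstr c p) ≤ p.1 ∧ pvFp c (pvSubstr c p) = (pvF c (pvSubstr c p), pvF c (pvSubstr c p) + (p.2 - p.1)) := by
  have hnn := (PySem.Chars.find_nonneg_iff c (pvSubstr c p).toList).mpr hm.2.2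
  have hspec := (PySem.Chars.find_spec hnn).2
  have hpre : (pvSubstr c p).toList <+: List.drop p.1 c := by
    rw [pvSubstr_toList]; exact List.take_prefix _ _
  have hle : pvF c (pvSubstr c p) ≤ p.1 := by
    by_contra hlt
    exact hspec p.1 (by simp only [pvF] at hlt; omega) hpre
  exact ⟨hle, by simp [pvFp, pvSubstr_len h1 h2]⟩

-- the main invariant of A's collection loop: it appends each matched substring exactly
-- once, at its first occurrence pair, so the collected list is ordered by (find, length)
lemma pvMain (K : List String) (c : List Char) :
    ∀ (R : List (ℕ × ℕ)) (S : List String),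
    (∀ p ∈ R, p.1 < p.2 ∧ p.2 ≤ c.length) →
    R.Pairwise pvPlex →
    (∀ x ∈ S, ∀ p ∈ R, pvPlex (pvFp c x) p) →
    S.Pairwise (fun a b => pvPlex (pvFp c a) (pvFp c b)) →
    (∀ x ∈ S, pvMatched K c x) →
    (∀ x, pvMatched K c x → pvFp c x ∈ R ∨ x ∈ S) →
    (∀ x, x ∈ R.foldl (pvStep K c) S ↔ ((pvMatched K c x ∧ pvFp c x ∈ R) ∨ x ∈ S))
    ∧ (R.foldl (pvStep K c) S).Pairwise (fun a b => pvPlex (pvFp c a) (pvFp c b)) := by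
  intro R
  induction R with
  | nil =>
    intro S _ _ _ hSp _ _
    exact ⟨by simp, by simpa using hSp⟩
  | cons p R ih =>
    intro S hRv hRs hSb hSp hSm hcov
    have hpv := hRv p (by simp)
    rw [List.foldl_cons]
    by_cases hc : pvSubstr c p ∈ K ∧ pvSubstr c p ∉ S
    · have hsm := pvSubstr_matched (c := c) hpv.1 hpv.2
      have hx0m : pvMatched K c (pvSubstr c p) := ⟨hc.1, hsm.1, hsm.2⟩
      have hfle := pvF_le hpv.1 hpv.2 hx0m
      have hfple : pvPlex (pvFp c (pvSubstr c p)) p ∨ pvFp c (pvSubstr c p) = p := by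
        rcases Nat.lt_or_ge (pvF c (pvSubstr c p)) p.1 with h | h
        · left; exact Or.inl (by rw [hfle.2]; exact h)
        · right
          have he : pvF c (pvSubstr c p) = p.1 := by omega
          rw [hfle.2, he]
          have : p.1 + (p.2 - p.1) = p.2 := by omega
          rw [this]
      have hfp : pvFp c (pvSubstr c p) = p := by
        rcases hcov (pvSubstr c p) hx0m with h | h
        · rcases List.mem_cons.mp h with h | h
          · exact h
          · exfalso
            have hpl := List.rel_of_pairwise_cons hRs h
            rcases hfple with hl | he
            · unfold pvPlex at hpl hl; omega
            · rw [he] at hpl; unfold pvPlex at hpl; omega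
        · exact absurd h hc.2
      have hstep : pvStep K c S p = S ++ [pvSubstr c p] := by rw [pvStep, if_pos hc]
      rw [hstep]
      have hSb' : ∀ x ∈ S ++ [pvSubstr c p], ∀ q ∈ R, pvPlex (pvFp c x) q := by
        intro x hx q hq
        rcases List.mem_append.mp hx with hx | hx
        · exact hSb x hx q (by simp [hq])
        · simp at hx; subst hx; rw [hfp]; exact List.rel_of_pairwise_cons hRs hq
      have hSp' : (S ++ [pvSubstr c p]).Pairwise (fun a b => pvPlex (pvFp c a) (pvFp c b)) := by
        rw [List.pairwise_append]
        refine ⟨hSp, by simp, ?_⟩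
        intro a ha b hb
        simp at hb; subst hb
        rw [hfp]; exact hSb a ha p (by simp)
      have hSm' : ∀ x ∈ S ++ [pvSubstr c p], pvMatched K c x := by
        intro x hx
        rcases List.mem_append.mp hx with hx | hx
        · exact hSm x hx
        · simp at hx; subst hx; exact hx0m
      have hcov' : ∀ x, pvMatched K c x → pvFp c x ∈ R ∨ x ∈ S ++ [pvSubstr c p] := by
        intro x hm
        rcases hcov x hm with h | h
        · rcases List.mem_cons.mp h with h | h
          · right; rw [pvUnique hm h]; simp
          · left; exact h
        · right; exact List.mem_append_left _ h
      obtain ⟨ihm, ihp⟩ := ih (S ++ [pvSubstr c p])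
        (fun q hq => hRv q (by simp [hq])) (List.Pairwise.of_cons hRs) hSb' hSp' hSm' hcov'
      refine ⟨?_, ihp⟩
      intro x
      rw [ihm x]
      constructor
      · rintro (⟨hm, hR⟩ | hx)
        · exact Or.inl ⟨hm, by simp [hR]⟩
        · rcases List.mem_append.mp hx with h | h
          · exact Or.inr h
          · simp at h; subst h; exact Or.inl ⟨hx0m, by simp [hfp]⟩
      · rintro (⟨hm, hR⟩ | hx)
        · rcases List.mem_cons.mp hR with h | h
          · right; rw [pvUnique hm h]; simp
          · left; exact ⟨hm, h⟩
        · right; exact List.mem_append_left _ hx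
    · have hstep : pvStep K c S p = S := by rw [pvStep, if_neg hc]
      rw [hstep]
      have hkey : ∀ x, pvMatched K c x → pvFp c x = p → x ∈ S := by
        intro x hm hfpx
        have hx : x = pvSubstr c p := pvUnique hm hfpx
        by_cases hS : pvSubstr c p ∈ S
        · rw [hx]; exact hS
        · exfalso; rw [hx] at hm; exact hc ⟨hm.1, hS⟩
      have hcov' : ∀ x, pvMatched K c x → pvFp c x ∈ R ∨ x ∈ S := by
        intro x hm
        rcases hcov x hm with h | h
        · rcases List.mem_cons.mp h with h | h
          · exact Or.inr (hkey x hm h)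
          · exact Or.inl h
        · exact Or.inr h
      obtain ⟨ihm, ihp⟩ := ih S (fun q hq => hRv q (by simp [hq])) (List.Pairwise.of_cons hRs)
        (fun x hx q hq => hSb x hx q (by simp [hq])) hSp hSm hcov'
      refine ⟨?_, ihp⟩
      intro x
      rw [ihm x]
      constructor
      · rintro (⟨hm, hR⟩ | hx)
        · exact Or.inl ⟨hm, by simp [hR]⟩
        · exact Or.inr hx
      · rintro (⟨hm, hR⟩ | hx)
        · rcases List.mem_cons.mp hR with h | h
          · exact Or.inr (hkey x hm h)
          · exact Or.inl ⟨hm, h⟩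
        · exact Or.inr hx

lemma pvFoldlCongr {α β : Type} (l : List β) (init : α) (f g : α → β → α)
    (h : ∀ a b, f a b = g a b) : l.foldl f init = l.foldl g init := by
  have : f = g := funext fun a => funext fun b => h a b
  rw [this]

-- A's nested loops compute the fold of pvStep over pvPairs
lemma pvAloop (dictionary : List (String × Int)) (s : String) :
    detect_substring dictionary s
      = PySem.List.sorted
          ((pvPairs s.toList.length).foldl
            (pvStep ((PySem.Dict.ofList dictionary).keys) s.toList) [])
          PySem.Str.len true := by
  unfold detect_substring
  apply congrArg (fun l => PySem.List.sorted l PySem.Str.len true)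
  rw [pvPairs, List.foldl_flatMap]
  simp only [List.foldl_map]
  rw [PySem.Str.len_eq, PySem.List.pyRange_zero_natCast, List.foldl_map]
  apply pvFoldlCongr
  intro S i
  have h1 : ((i : ℤ) + 1) = ((i + 1 : ℕ) : ℤ) := by push_cast; ring
  have h2 : ((s.toList.length : ℤ) + 1) = ((s.toList.length + 1 : ℕ) : ℤ) := by push_cast; ring
  rw [h1, h2, pvPyRange_natCast]
  simp only [List.foldl_map]
  have h3 : s.toList.length + 1 - (i + 1) = s.toList.length - i := by omega
  rw [h3]
  apply pvFoldlCongr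
  intro S j
  rw [pvKeysFold]
  have hs : PySem.Str.slice s (some (i : ℤ)) (some (j : ℤ)) = pvSubstr s.toList (i, j) := by
    simp [PySem.Str.slice, PySem.Chars.slice, PySem.List.slice_natCast, pvSubstr]
  rw [pvStep, hs]

lemma pvInsertBy_congr (b1 b2 : String → String → Bool) (x : String) :
    ∀ acc : List String, (∀ y ∈ acc, b1 x y = b2 x y) →
      PySem.List.insertBy b1 x acc = PySem.List.insertBy b2 x acc := by
  intro acc
  induction acc with
  | nil => intro _; rfl
  | cons y ys ih =>
    intro h
    simp only [PySem.List.insertBy]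
    rw [h y (by simp)]
    by_cases hb : b2 x y = true
    · simp [hb]
    · simp only [Bool.not_eq_true] at hb
      simp [hb, ih (fun z hz => h z (by simp [hz]))]

-- stable sort by length descending = sort by (-len, find) when earlier elements
-- of equal length have strictly smaller find
lemma pvFoldCong (s : String) :
    ∀ (xs acc : List String),
    xs.Pairwise (fun a b => PySem.Str.len a = PySem.Str.len b → PySem.Str.find s a < PySem.Str.find s b) →
    (∀ x ∈ xs, ∀ y ∈ acc, PySem.Str.len x = PySem.Str.len y → PySem.Str.find s y < PySem.Str.find s x) →
    xs.foldl (fun acc x => PySem.List.insertBy (fun a b => decide (PySem.Str.len b < PySem.Str.len a)) x acc) acc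
      = xs.foldl (fun acc x => PySem.List.insertBy
          (fun a b => decide (-(PySem.Str.len a) < -(PySem.Str.len b)) ||
            !decide (-(PySem.Str.len b) < -(PySem.Str.len a)) && decide (PySem.Str.find s a < PySem.Str.find s b)) x acc) acc := by
  intro xs
  induction xs with
  | nil => intro acc _ _; rfl
  | cons x xs ih =>
    intro acc hp hacc
    simp only [List.foldl_cons]
    have hins : PySem.List.insertBy (fun a b => decide (PySem.Str.len b < PySem.Str.len a)) x acc
        = PySem.List.insertBy
            (fun a b => decide (-(PySem.Str.len a) < -(PySem.Str.len b)) ||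
              !decide (-(PySem.Str.len b) < -(PySem.Str.len a)) && decide (PySem.Str.find s a < PySem.Str.find s b)) x acc := by
      apply pvInsertBy_congr
      intro y hy
      have h1 := hacc x (by simp) y hy
      rw [← decide_not, ← Bool.decide_and, ← Bool.decide_or, decide_eq_decide]
      omega
    rw [hins]
    apply ih _ (List.Pairwise.of_cons hp)
    intro z hz y hy
    rw [PySem.List.mem_insertBy] at hy
    rcases hy with rfl | hy
    · exact fun he => (List.rel_of_pairwise_cons hp hz) he.symm
    · exact hacc z (by simp [hz]) y hy

lemma pvStable (s : String) (xs : List String)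
    (hp : xs.Pairwise (fun a b => PySem.Str.len a = PySem.Str.len b → PySem.Str.find s a < PySem.Str.find s b)) :
    PySem.List.sorted xs PySem.Str.len true
      = PySem.List.sorted2 xs (fun k => -(PySem.Str.len k)) (fun k => PySem.Str.find s k) false := by
  simp only [PySem.List.sorted, PySem.List.sorted2]
  simp only [if_neg (by decide : ¬(false = true))]
  exact pvFoldCong s xs [] hp (by simp)

lemma pvInsertBy_pairwise (k1 k2 : String → ℤ) (x : String) :
    ∀ ys : List String, ys.Pairwise (pvRle k1 k2) →
    (PySem.List.insertBy
      (fun a b => decide (k1 a < k1 b) || !decide (k1 b < k1 a) && decide (k2 a < k2 b)) x ys).Pairwise (pvRle k1 k2) := by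
  intro ys
  induction ys with
  | nil => intro _; simp [PySem.List.insertBy]
  | cons y ys ih =>
    intro hp
    rw [List.pairwise_cons] at hp
    simp only [PySem.List.insertBy]
    by_cases hb : (decide (k1 x < k1 y) || !decide (k1 y < k1 x) && decide (k2 x < k2 y)) = true
    · rw [if_pos hb]
      simp only [Bool.or_eq_true, Bool.and_eq_true, decide_eq_true_eq, Bool.not_eq_true',
        decide_eq_false_iff_not] at hb
      rw [List.pairwise_cons]
      constructor
      · intro z hz
        rcases List.mem_cons.mp hz with rfl | hz
        · unfold pvRle; omega
        · have hyz := hp.1 z hz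
          unfold pvRle at *
          omega
      · exact List.pairwise_cons.mpr hp
    · rw [if_neg hb]
      simp only [Bool.or_eq_true, Bool.and_eq_true, decide_eq_true_eq, Bool.not_eq_true',
        decide_eq_false_iff_not] at hb
      push Not at hb
      rw [List.pairwise_cons]
      constructor
      · intro z hz
        rw [PySem.List.mem_insertBy] at hz
        rcases hz with rfl | hz
        · unfold pvRle
          rcases lt_trichotomy (k1 y) (k1 z) with h | h | h
          · omega
          · have := hb.2 (by omega)
            omega
          · have := hb.1
            omega
        · exact hp.1 z hz
      · exact ih hp.2

lemma pvSorted2_pairwise (k1 k2 : String → ℤ) (xs : List String) :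
    (PySem.List.sorted2 xs k1 k2 false).Pairwise (pvRle k1 k2) := by
  simp only [PySem.List.sorted2]
  rw [if_neg (by decide : ¬(false = true))]
  suffices h : ∀ acc : List String, acc.Pairwise (pvRle k1 k2) →
      (xs.foldl (fun acc x => PySem.List.insertBy
        (fun a b => decide (k1 a < k1 b) || !decide (k1 b < k1 a) && decide (k2 a < k2 b)) x acc) acc).Pairwise (pvRle k1 k2) by
    exact h [] (by simp)
  induction xs with
  | nil => intro acc h; exact h
  | cons x xs ih =>
    intro acc h
    exact ih _ (pvInsertBy_pairwise k1 k2 x acc h)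

-- a sorted2 of a permutation with a key injective on its elements is unique
lemma pvUniq (k1 k2 : String → ℤ) (xs ys : List String) (hperm : xs.Perm ys) (hnd : xs.Nodup)
    (hinj : ∀ x ∈ xs, ∀ y ∈ xs, k1 x = k1 y → k2 x = k2 y → x = y) :
    PySem.List.sorted2 xs k1 k2 false = PySem.List.sorted2 ys k1 k2 false := by
  set r : String → String → Prop := fun a b => k1 a < k1 b ∨ (k1 a = k1 b ∧ k2 a < k2 b) with hr
  have hpx : (PySem.List.sorted2 xs k1 k2 false).Perm xs := PySem.List.sorted2_perm xs k1 k2 false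
  have hpy : (PySem.List.sorted2 ys k1 k2 false).Perm ys := PySem.List.sorted2_perm ys k1 k2 false
  have hstrict : ∀ (zs : List String), zs.Perm xs →
      (PySem.List.sorted2 zs k1 k2 false).Pairwise r := by
    intro zs hzs
    have hnd' : (PySem.List.sorted2 zs k1 k2 false).Nodup :=
      (((PySem.List.sorted2_perm zs k1 k2 false).trans hzs).nodup_iff).mpr hnd
    have hmem : ∀ a ∈ PySem.List.sorted2 zs k1 k2 false, a ∈ xs := by
      intro a ha
      exact hzs.mem_iff.mp ((PySem.List.sorted2_perm zs k1 k2 false).mem_iff.mp ha)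
    have := (pvSorted2_pairwise k1 k2 zs).and hnd'
    apply this.imp_of_mem
    intro a b ha hb hab
    rcases hab.1 with h | h
    · exact Or.inl h
    · right
      refine ⟨h.1, lt_of_le_of_ne h.2 ?_⟩
      intro hk2
      exact hab.2 (hinj a (hmem a ha) b (hmem b hb) h.1 hk2)
  have h1 := hstrict xs (List.Perm.refl xs)
  have h2 := hstrict ys hperm.symm
  refine List.Perm.eq_of_pairwise ?_ h1 h2 (hpx.trans (hperm.trans hpy.symm))
  intro a b _ _ hab hba
  exfalso
  rw [hr] at hab hba
  omega

-- ===== VERDICT (by name: the statement is the Claim_ definition above) =====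
theorem detect_substring_spec : Claim_equal_detect_substring := by
  intro dictionary s _hdom
  unfold Spec_detect_substring
  have hK : ((PySem.Dict.ofList dictionary).keys).Nodup := PySem.Dict.nodup_keys_ofList dictionary
  set K := (PySem.Dict.ofList dictionary).keys with hKdef
  set c := s.toList with hcdef
  obtain ⟨hmem, hpair⟩ := pvMain K c (pvPairs c.length) []
    (fun p hp => (pvMem_pvPairs c.length p).mp hp)
    (pvPairs_sorted c.length)
    (by simp) (by simp) (by simp)
    (fun x hm => Or.inl ((pvMem_pvPairs c.length (pvFp c x)).mpr (pvFp_valid hm)))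
  set subsA := (pvPairs c.length).foldl (pvStep K c) [] with hsubs
  have hmem' : ∀ x, x ∈ subsA ↔ pvMatched K c x := by
    intro x
    rw [hmem x]
    constructor
    · rintro (⟨hm, _⟩ | hx)
      · exact hm
      · simp at hx
    · intro hm
      exact Or.inl ⟨hm, (pvMem_pvPairs c.length (pvFp c x)).mpr (pvFp_valid hm)⟩
  set matchedL := K.filter (fun k => decide (k ≠ "") && PySem.Str.isIn k s) with hmL
  have hmemB : ∀ x, x ∈ matchedL ↔ pvMatched K c x := by
    intro x
    rw [hmL, List.mem_filter, pvMatched]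
    simp only [Bool.and_eq_true, decide_eq_true_eq]
    rw [PySem.Str.isIn_iff_infix]
    constructor
    · rintro ⟨h1, h2, h3⟩
      refine ⟨h1, ?_, h3⟩
      intro hnil
      exact h2 (by rw [← String.toList_inj, hnil]; rfl)
    · rintro ⟨h1, h2, h3⟩
      refine ⟨h1, ?_, h3⟩
      intro hnil
      exact h2 (by rw [hnil]; rfl)
  have hndA : subsA.Nodup := by
    apply hpair.imp
    intro a b h heq
    subst heq
    unfold pvPlex at h
    omega
  have hndB : matchedL.Nodup := hK.filter _
  have hperm : subsA.Perm matchedL :=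
    (List.perm_ext_iff_of_nodup hndA hndB).mpr (fun a => (hmem' a).trans (hmemB a).symm)
  have htie : subsA.Pairwise
      (fun a b => PySem.Str.len a = PySem.Str.len b → PySem.Str.find s a < PySem.Str.find s b) := by
    apply hpair.imp_of_mem
    intro a b ha hb h hlen
    have hma := (hmem' a).mp ha
    have hmb := (hmem' b).mp hb
    rw [PySem.Str.find_eq, PySem.Str.find_eq, ← hcdef, ← pvF_cast hma, ← pvF_cast hmb]
    rw [PySem.Str.len_eq, PySem.Str.len_eq] at hlen
    have hlen' : a.toList.length = b.toList.length := by exact_mod_cast hlen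
    unfold pvPlex pvFp at h
    simp only [] at h
    rw [← hcdef] at *
    have : pvF c a < pvF c b := by
      rcases h with h | h
      · exact h
      · omega
    exact_mod_cast this
  have hinj : ∀ x ∈ subsA, ∀ y ∈ subsA,
      -(PySem.Str.len x) = -(PySem.Str.len y) → PySem.Str.find s x = PySem.Str.find s y → x = y := by
    intro x hx y hy hlen hfind
    have hmx := (hmem' x).mp hx
    have hmy := (hmem' y).mp hy
    rw [PySem.Str.len_eq, PySem.Str.len_eq] at hlen
    have hlen' : x.toList.length = y.toList.length := by omega
    rw [PySem.Str.find_eq, PySem.Str.find_eq, ← hcdef, ← pvF_cast hmx, ← pvF_cast hmy] at hfind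
    have hf : pvF c x = pvF c y := by exact_mod_cast hfind
    rw [← String.toList_inj]
    rw [pvTake hmx, pvTake hmy, hlen', hf]
  calc detect_substring dictionary s
      = PySem.List.sorted subsA PySem.Str.len true := by
        rw [pvAloop dictionary s]
    _ = PySem.List.sorted2 subsA (fun k => -(PySem.Str.len k)) (fun k => PySem.Str.find s k) false :=
        pvStable s subsA htie
    _ = PySem.List.sorted2 matchedL (fun k => -(PySem.Str.len k)) (fun k => PySem.Str.find s k) false :=
        pvUniq _ _ subsA matchedL hperm hndA hinj
    _ = detect_substring_alt dictionary s := rfl
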